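-- pv_equiv track=rewrite | github.com/KendrickAng/competitive-programming | python/fbhack/matchsticks/medium/submission1.py | solve
-- ===== SOURCE A (Python) =====
-- from collections import defaultdict
--
-- def solve(lineArr):
--     if not lineArr:
--         return -1
--     mem = defaultdict(int)
--     candidates = []
--     for match in lineArr:
--         mem[match] += 1
--         if mem[match] == 2 or mem[match] == 4:
--             candidates.append(match)
--     if len(candidates) < 2:
--         return -1
--     candidates.sort(reverse=True)
--     return candidates[0] * 2 + candidates[1] * 2
-- ===== SOURCE B (Python) =====
-- def _push(best1, best2, x):
--     """Insert pair value x into the descending top-two (best1, best2)."""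
--     if best1 is None or x > best1:
--         return x, best1
--     if best2 is None or x > best2:
--         return best1, x
--     return best1, best2
--
-- def solve(lineArr):
--     cnt = {}
--     best1 = None
--     best2 = None
--     for x in lineArr:
--         c = cnt.get(x, 0) + 1
--         cnt[x] = c
--         if c % 2 == 0:
--             best1, best2 = _push(best1, best2, x)
--     if best1 is None or best2 is None:
--         return -1
--     return 2 * best1 + 2 * best2
-- ===== Notes on version B (the rewrite author's own statement) =====
-- stated objective: alternative
-- what changed: B drops A's candidate list and descending sort entirely: one pass over the input keeps a counter and just the top two completed pair lengths (an O(1) best1/best2 state updated on every even count), returning 2*best1 + 2*best2 at the end.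
import Mathlib
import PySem

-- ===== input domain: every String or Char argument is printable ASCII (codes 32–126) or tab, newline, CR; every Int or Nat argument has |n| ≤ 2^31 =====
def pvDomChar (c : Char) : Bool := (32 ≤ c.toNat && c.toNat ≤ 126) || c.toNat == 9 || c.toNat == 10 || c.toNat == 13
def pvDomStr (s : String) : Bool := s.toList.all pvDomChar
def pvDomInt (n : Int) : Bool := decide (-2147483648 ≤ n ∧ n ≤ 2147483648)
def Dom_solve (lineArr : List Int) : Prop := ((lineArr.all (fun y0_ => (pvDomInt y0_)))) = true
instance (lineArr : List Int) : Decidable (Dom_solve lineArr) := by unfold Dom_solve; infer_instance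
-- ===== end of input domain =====

-- B replaces A's candidate list + descending sort by a single pass that tracks the top two
-- completed pair lengths on the fly (objective: alternative decomposition, no sort, O(1) extra state).

-- ===== PORT A =====
-- loop body of A: count the matchstick, append it to candidates when its count reaches 2 or 4
def stepA (st : PySem.Dict Int Int × List Int) (m : Int) : PySem.Dict Int Int × List Int :=
  let mem := st.1.insert m (st.1.getD m 0 + 1)
  if mem.getD m 0 = 2 ∨ mem.getD m 0 = 4 then (mem, st.2 ++ [m]) else (mem, st.2)

def solve (lineArr : List Int) : Int :=
  if lineArr = [] then -1
  else
    let st := lineArr.foldl stepA (PySem.Dict.empty, [])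
    if (st.2.length : Int) < 2 then -1
    else
      let cs := PySem.List.sorted st.2 (fun x => x) true
      -- candidates[0], candidates[1]: in range since the guard ensures length ≥ 2 (no IndexError)
      PySem.List.pyGetD cs 0 0 * 2 + PySem.List.pyGetD cs 1 0 * 2

-- ===== PORT B =====
-- helper _push of Source B: insert pair value x into the descending top-two (best1, best2)
def pushTop2 (best1 best2 : Option Int) (x : Int) : Option Int × Option Int :=
  match best1 with
  | none => (some x, none)          -- best1 is None: return x, best1 (= None)
  | some b1 =>
    if x > b1 then (some x, some b1)
    else
      match best2 with
      | none => (some b1, some x)    -- best2 is None: return best1, x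
      | some b2 => if x > b2 then (some b1, some x) else (some b1, some b2)

-- loop body of B: count the matchstick; each completed pair (even count) updates the top two
def stepB (st : PySem.Dict Int Int × Option Int × Option Int) (x : Int) :
    PySem.Dict Int Int × Option Int × Option Int :=
  let c := st.1.getD x 0 + 1
  let cnt := st.1.insert x c
  if PySem.Int.mod c 2 = 0 then (cnt, pushTop2 st.2.1 st.2.2 x) else (cnt, st.2)

def solve_alt (lineArr : List Int) : Int :=
  let st := lineArr.foldl stepB (PySem.Dict.empty, none, none)
  match st.2.1, st.2.2 with
  | some b1, some b2 => 2 * b1 + 2 * b2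
  | _, _ => -1

-- ===== PRECONDITION & SPEC =====
def Spec_solve (lineArr : List Int) (out : Int) : Prop := out = solve_alt lineArr
instance (lineArr : List Int) (out : Int) : Decidable (Spec_solve lineArr out) := by unfold Spec_solve; infer_instance

-- ===== CLAIM (what is proved, stated in full; the proofs are below) =====
def Claim_equal_solve : Prop := ∀ (lineArr : List Int), Dom_solve lineArr → Spec_solve lineArr (solve lineArr)

-- ===== LEMMAS AND PROOFS =====

-- the running top-two of a list of pair values
def top2 (l : List Int) : Option Int × Option Int :=
  l.foldl (fun s x => pushTop2 s.1 s.2 x) (none, none)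

-- invariant tying A's counter to its candidate list: each value occurs in candidates
-- once per crossing of count 2 and of count 4, and counts are nonnegative
def CandInv (mem : PySem.Dict Int Int) (cands : List Int) : Prop :=
  ∀ v : Int, 0 ≤ mem.getD v 0 ∧
    (cands.count v : Int) = (if 2 ≤ mem.getD v 0 then 1 else 0) + (if 4 ≤ mem.getD v 0 then 1 else 0)

lemma push_rcomm (z : Option Int × Option Int) (x y : Int) :
    pushTop2 (pushTop2 z.1 z.2 x).1 (pushTop2 z.1 z.2 x).2 y
      = pushTop2 (pushTop2 z.1 z.2 y).1 (pushTop2 z.1 z.2 y).2 x := by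
  rcases z with ⟨_|b1, _|b2⟩ <;>
    simp only [pushTop2] <;>
    repeat' split_ifs <;> simp_all [Prod.ext_iff] <;> try omega

lemma top2_perm {l l' : List Int} (h : l.Perm l') : top2 l = top2 l' := by
  unfold top2
  exact h.foldl_eq' (fun x _ y _ z => push_rcomm z x y) (none, none)

lemma top2_append (l : List Int) (x : Int) :
    top2 (l ++ [x]) = pushTop2 (top2 l).1 (top2 l).2 x := by
  unfold top2; simp [List.foldl_append]

lemma foldl_push_const {a b : Int} (t : List Int) (ht : ∀ x ∈ t, x ≤ b) (hab : b ≤ a) :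
    t.foldl (fun s x => pushTop2 s.1 s.2 x) (some a, some b) = (some a, some b) := by
  induction t with
  | nil => rfl
  | cons y t ih =>
    have hy : y ≤ b := ht y (by simp)
    have hpush : pushTop2 (some a) (some b) y = (some a, some b) := by
      simp only [pushTop2]
      rw [if_neg (by omega), if_neg (by omega)]
    simpa [hpush] using ih (fun x hx => ht x (by simp [hx]))

lemma top2_desc (a b : Int) (t : List Int) (h : (a :: b :: t).Pairwise (fun p q => q ≤ p)) :
    top2 (a :: b :: t) = (some a, some b) := by
  have hab : b ≤ a := (List.pairwise_cons.mp h).1 b (by simp)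
  have ht : ∀ x ∈ t, x ≤ b :=
    fun x hx => (List.pairwise_cons.mp (List.pairwise_cons.mp h).2).1 x hx
  have hstep : top2 (a :: b :: t)
      = t.foldl (fun s x => pushTop2 s.1 s.2 x) (pushTop2 (some a) none b) := by
    unfold top2; simp [pushTop2]
  have hb : pushTop2 (some a) none b = (some a, some b) := by
    simp only [pushTop2]; rw [if_neg (by omega)]
  rw [hstep, hb]; exact foldl_push_const t ht hab

lemma push_noop_of_count (cands : List Int) (x : Int) (h : 2 ≤ cands.count x) :
    pushTop2 (top2 cands).1 (top2 cands).2 x = top2 cands := by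
  have hperm : (PySem.List.sorted cands (fun x => x) true).Perm cands :=
    PySem.List.sorted_perm cands (fun x => x) true
  have hpw : (PySem.List.sorted cands (fun x => x) true).Pairwise (fun p q => q ≤ p) := by
    simpa using PySem.List.sorted_pairwise_rev cands (fun x => x)
  have hcount : 2 ≤ (PySem.List.sorted cands (fun x => x) true).count x := by
    rw [hperm.count_eq]; exact h
  have hlen : 2 ≤ (PySem.List.sorted cands (fun x => x) true).length :=
    le_trans hcount (List.count_le_length)
  rcases hsh : PySem.List.sorted cands (fun x => x) true with _ | ⟨a, _ | ⟨b, t⟩⟩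
  · rw [hsh] at hlen; simp at hlen
  · rw [hsh] at hlen; simp at hlen
  · rw [hsh] at hperm hpw hcount
    rw [← top2_perm hperm, top2_desc a b t hpw]
    have hxbt : x ∈ b :: t := by
      have hc : 0 < (b :: t).count x := by
        have h' := hcount
        rw [List.count_cons] at h'
        simp only [beq_iff_eq] at h'
        split_ifs at h' <;> omega
      exact List.count_pos_iff.mp hc
    have hb : x ≤ b := by
      rcases List.mem_cons.mp hxbt with h' | h'
      · omega
      · exact le_trans (List.rel_of_pairwise_cons (List.pairwise_cons.mp hpw).2 h') le_rfl
    have hab : b ≤ a := (List.pairwise_cons.mp hpw).1 b (by simp)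
    simp only [pushTop2]
    rw [if_neg (by omega), if_neg (by omega)]

lemma candInv_empty : CandInv PySem.Dict.empty [] := by
  intro v; simp [PySem.Dict.getD_empty]

lemma loop_main : ∀ (l : List Int) (mem : PySem.Dict Int Int) (cands : List Int),
    CandInv mem cands →
    CandInv (l.foldl stepA (mem, cands)).1 (l.foldl stepA (mem, cands)).2 ∧
    l.foldl stepB (mem, top2 cands)
      = ((l.foldl stepA (mem, cands)).1, top2 (l.foldl stepA (mem, cands)).2) := by
  intro l
  induction l with
  | nil => intro mem cands hI; exact ⟨hI, rfl⟩
  | cons x t ih =>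
    intro mem cands hI
    have hx0 : 0 ≤ mem.getD x 0 := (hI x).1
    set c : Int := mem.getD x 0 + 1 with hc
    have hgd : (mem.insert x c).getD x 0 = c := PySem.Dict.getD_insert_self _ _ _ _
    have hgd' : ∀ v : Int, (mem.insert x c).getD v 0 = if v = x then c else mem.getD v 0 :=
      fun v => PySem.Dict.getD_insert _ _ _ _ _
    by_cases h24 : c = 2 ∨ c = 4
    · -- A appends, B pushes
      have hA : stepA (mem, cands) x = (mem.insert x c, cands ++ [x]) := by
        simp only [stepA, ← hc, hgd]; rw [if_pos h24]
      have hmod : PySem.Int.mod c 2 = 0 := by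
        rw [PySem.Int.mod_eq_zero_iff_dvd]; rcases h24 with h | h <;> omega
      have hB : stepB (mem, top2 cands) x = (mem.insert x c, top2 (cands ++ [x])) := by
        simp only [stepB, ← hc]; rw [if_pos hmod, top2_append]
      have hI' : CandInv (mem.insert x c) (cands ++ [x]) := by
        intro v
        have hv := hI v
        rcases eq_or_ne v x with rfl | hne
        · obtain ⟨hv1, hv2⟩ := hv
          refine ⟨by rw [hgd]; omega, ?_⟩
          rw [hgd]
          simp only [List.count_append, List.count_cons, List.count_nil, beq_iff_eq]
          push_cast
          rcases h24 with h | h <;> split_ifs at hv2 ⊢ <;> omega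
        · refine ⟨by rw [hgd' v, if_neg hne]; exact hv.1, ?_⟩
          rw [hgd' v, if_neg hne]
          have hzero : ((cands ++ [x]).count v) = cands.count v := by
            simp only [List.count_append, List.count_cons, List.count_nil, beq_iff_eq]
            split_ifs with hvx
            · exact absurd hvx.symm hne
            · omega
          rw [hzero]
          exact hv.2
      simp only [List.foldl_cons, hA, hB]
      exact ih _ _ hI'
    · by_cases hmod : PySem.Int.mod c 2 = 0
      · -- even count ≥ 6: A skips, B's push is a no-op
        have hdvd : (2 : Int) ∣ c := (PySem.Int.mod_eq_zero_iff_dvd c 2).mp hmod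
        have hcnt : 2 ≤ cands.count x := by
          have hv := (hI x).2
          split_ifs at hv <;> omega
        have hA : stepA (mem, cands) x = (mem.insert x c, cands) := by
          simp only [stepA, ← hc, hgd]; rw [if_neg h24]
        have hB : stepB (mem, top2 cands) x = (mem.insert x c, top2 cands) := by
          simp only [stepB, ← hc]; rw [if_pos hmod, push_noop_of_count cands x hcnt]
        have hI' : CandInv (mem.insert x c) cands := by
          intro v
          have hv := hI v
          rcases eq_or_ne v x with rfl | hne
          · rw [hgd]
            refine ⟨by omega, ?_⟩
            rcases hv with ⟨hv1, hv2⟩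
            split_ifs at hv2 ⊢ <;> omega
          · rw [hgd' v, if_neg hne]; exact hv
        simp only [List.foldl_cons, hA, hB]
        exact ih _ _ hI'
      · -- odd count: both skip
        have hndvd : ¬ (2 : Int) ∣ c := fun hd => hmod ((PySem.Int.mod_eq_zero_iff_dvd c 2).mpr hd)
        have hA : stepA (mem, cands) x = (mem.insert x c, cands) := by
          simp only [stepA, ← hc, hgd]; rw [if_neg h24]
        have hB : stepB (mem, top2 cands) x = (mem.insert x c, top2 cands) := by
          simp only [stepB, ← hc]; rw [if_neg hmod]
        have hI' : CandInv (mem.insert x c) cands := by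
          intro v
          have hv := hI v
          rcases eq_or_ne v x with rfl | hne
          · rw [hgd]
            refine ⟨by omega, ?_⟩
            rcases hv with ⟨hv1, hv2⟩
            split_ifs at hv2 ⊢ <;> omega
          · rw [hgd' v, if_neg hne]; exact hv
        simp only [List.foldl_cons, hA, hB]
        exact ih _ _ hI'

-- the closing computation of both programs agree, given B's state is top2 of A's candidates
lemma final_eq (cands : List Int) :
    (if (cands.length : Int) < 2 then (-1 : Int)
     else
       PySem.List.pyGetD (PySem.List.sorted cands (fun x => x) true) 0 0 * 2
         + PySem.List.pyGetD (PySem.List.sorted cands (fun x => x) true) 1 0 * 2)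
    = (match (top2 cands).1, (top2 cands).2 with
       | some b1, some b2 => 2 * b1 + 2 * b2
       | _, _ => (-1 : Int)) := by
  have hperm : (PySem.List.sorted cands (fun x => x) true).Perm cands :=
    PySem.List.sorted_perm cands (fun x => x) true
  have hpw : (PySem.List.sorted cands (fun x => x) true).Pairwise (fun p q => q ≤ p) := by
    simpa using PySem.List.sorted_pairwise_rev cands (fun x => x)
  rcases hsh : PySem.List.sorted cands (fun x => x) true with _ | ⟨a, _ | ⟨b, t⟩⟩
  · have h0 : cands = [] := by
      have := hperm.length_eq; rw [hsh] at this; simpa using (List.length_eq_zero_iff.mp this.symm)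
    subst h0
    norm_num
    rfl
  · have h1 : cands.length = 1 := by
      have := hperm.length_eq; rw [hsh] at this; exact this.symm
    have htop : top2 cands = (some a, none) := by
      rw [hsh] at hperm
      rw [← top2_perm hperm]; rfl
    rw [htop, if_pos (by rw [h1]; norm_num)]
  · rw [hsh] at hperm hpw
    have h2 : 2 ≤ cands.length := by
      rw [← hperm.length_eq]; simp
    have htop : top2 cands = (some a, some b) := by
      rw [← top2_perm hperm]; exact top2_desc a b t hpw
    rw [htop, if_neg (by omega)]
    simp [PySem.List.pyGetD]
    ring

-- ===== VERDICT (by name: the statement is the Claim_ definition above) =====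
theorem solve_spec : Claim_equal_solve := by
  intro lineArr _
  unfold Spec_solve solve solve_alt
  obtain ⟨hInv, hfold⟩ := loop_main lineArr PySem.Dict.empty [] candInv_empty
  rcases eq_or_ne lineArr [] with rfl | hne
  · rfl
  · rw [if_neg hne]
    have htop0 : top2 ([] : List Int) = (none, none) := rfl
    rw [htop0] at hfold
    rw [hfold]
    exact final_eq (lineArr.foldl stepA (PySem.Dict.empty, []) ).2
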